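-- pv_equiv track=rewrite | github.com/xlypen/nopolicybot | utils/text_formatting.py | strip_leading_name
-- ===== SOURCE A (Python) =====
-- def strip_leading_name(reply_text: str, first_name: str, user_name: str = "") -> str:
--     """
--     Убирает из начала ответа имя/ник вида `Имя, ...`, чтобы не дублировать упоминание в Telegram.
--     """
--     cleaned = (reply_text or "").strip()
--     names_to_strip = [first_name] if first_name else []
--     if user_name and user_name != first_name:
--         names_to_strip.append(user_name)
--     while True:
--         changed = False
--         for name in names_to_strip:
--             for sep in (",", "!", " ", ":", "，"):
--                 prefix = name + sep
--                 if cleaned.lower().startswith(prefix.lower()):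
--                     cleaned = cleaned[len(prefix):].strip()
--                     changed = True
--                     break
--             if changed:
--                 break
--         if not changed:
--             break
--     return cleaned
-- ===== SOURCE B (Python) =====
-- SEPARATORS = (",", "!", " ", ":", "，")
--
-- def strip_leading_name(reply_text: str, first_name: str, user_name: str = "") -> str:
--     """Recursively peel `Name<sep>` prefixes (case-insensitive) off the stripped text."""
--     names = [first_name.lower()] if first_name else []
--     if user_name and user_name != first_name:
--         names.append(user_name.lower())
--
--     def peel(text):
--         low = text.lower()
--         for n in names:
--             k = len(n)
--             if low[:k] == n and low[k:k + 1] in SEPARATORS: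
--                 return peel(text[k + 1:].strip())
--         return text
--
--     return peel((reply_text or "").strip())
-- ===== Notes on version B (the rewrite author's own statement) =====
-- stated objective: simpler
-- what changed: Replaces A's nested name-by-separator prefix loops (building name+sep strings and re-lowercasing the whole text for each pair) with a recursive peel that pre-lowercases the names once, lowercases the text once per round, and tests the single character after the name for membership in the separator set.
import Mathlib
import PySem

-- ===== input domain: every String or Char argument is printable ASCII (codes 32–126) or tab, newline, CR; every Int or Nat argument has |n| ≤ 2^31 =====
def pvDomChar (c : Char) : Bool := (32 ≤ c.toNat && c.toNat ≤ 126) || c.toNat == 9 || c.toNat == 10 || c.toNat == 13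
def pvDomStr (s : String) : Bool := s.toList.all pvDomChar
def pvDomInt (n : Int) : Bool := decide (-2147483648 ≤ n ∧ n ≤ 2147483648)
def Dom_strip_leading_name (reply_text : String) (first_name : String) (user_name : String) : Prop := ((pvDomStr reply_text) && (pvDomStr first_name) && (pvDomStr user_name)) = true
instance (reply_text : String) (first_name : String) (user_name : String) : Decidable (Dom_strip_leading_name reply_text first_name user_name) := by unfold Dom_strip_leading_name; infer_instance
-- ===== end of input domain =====

-- B replaces A's nested name×separator prefix loops by one recursive peel that lowercases
-- the text once per round, matches each (pre-lowered) name, and tests the following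
-- character's membership in the separator set (objective: simpler).

-- ===== PORT A =====

-- inner 'for sep in (...)': returns the updated cleaned at the FIRST matching sep, none if no sep matches
def pvAtrySeps (cleaned name : List Char) : List (List Char) → Option (List Char)
  | [] => none
  | sep :: rest =>
    if PySem.Chars.startswith (PySem.Chars.lower cleaned) (PySem.Chars.lower (name ++ sep)) = true then
      some (PySem.Chars.strip (PySem.List.slice cleaned (some ((name ++ sep).length : Int)) none))
    else pvAtrySeps cleaned name rest

-- outer 'for name in names_to_strip' with the 'changed'/'break' bookkeeping:
-- the first name whose sep loop fired ends the pass
def pvAtryNames (cleaned : List Char) : List (List Char) → Option (List Char)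
  | [] => none
  | name :: rest =>
    match pvAtrySeps cleaned name [[','], ['!'], [' '], [':'], ['，']] with
    | some c => some c
    | none => pvAtryNames cleaned rest

-- 'while True: … if not changed: break'; fuel (cleaned.length + 1) only makes the loop total:
-- every successful pass strips a nonempty name plus a separator, so at most cleaned.length passes succeed
def pvAloop : Nat → List (List Char) → List Char → List Char
  | 0, _, cleaned => cleaned
  | fuel + 1, names, cleaned =>
    match pvAtryNames cleaned names with
    | some c => pvAloop fuel names c
    | none => cleaned

def strip_leading_name (reply_text : String) (first_name : String) (user_name : String) : String :=
  -- (reply_text or "").strip(): '' strips to '' either way, so strip is applied directly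
  let cleaned := PySem.Chars.strip reply_text.toList
  -- names_to_strip = [first_name] if first_name else []
  let names₀ : List (List Char) := if first_name = "" then [] else [first_name.toList]
  -- if user_name and user_name != first_name: names_to_strip.append(user_name)
  let names := if user_name ≠ "" ∧ user_name ≠ first_name then names₀ ++ [user_name.toList] else names₀
  String.ofList (pvAloop (cleaned.length + 1) names cleaned)

-- ===== PORT B =====

-- SEPARATORS = (",", "!", " ", ":", "，")
def pvSepsB : List (List Char) := [[','], ['!'], [' '], [':'], ['，']]

-- the 'for n in names' body of peel: low[:k] == n and low[k:k+1] in SEPARATORS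
def pvBstep (text low : List Char) : List (List Char) → Option (List Char)
  | [] => none
  | n :: rest =>
    if PySem.List.slice low none (some (n.length : Int)) = n ∧
       PySem.List.slice low (some (n.length : Int)) (some ((n.length + 1 : Nat) : Int)) ∈ pvSepsB then
      some (PySem.Chars.strip (PySem.List.slice text (some ((n.length + 1 : Nat) : Int)) none))
    else pvBstep text low rest

-- peel(text): recursion made total by fuel (text.length + 1): each recursive call shrinks text
def pvBpeel : Nat → List (List Char) → List Char → List Char
  | 0, _, text => text
  | fuel + 1, names, text =>
    match pvBstep text (PySem.Chars.lower text) names with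
    | some t => pvBpeel fuel names t
    | none => text

def strip_leading_name_alt (reply_text : String) (first_name : String) (user_name : String) : String :=
  let names₀ : List (List Char) := if first_name = "" then [] else [PySem.Chars.lower first_name.toList]
  let names := if user_name ≠ "" ∧ user_name ≠ first_name then names₀ ++ [PySem.Chars.lower user_name.toList] else names₀
  let cleaned := PySem.Chars.strip reply_text.toList
  String.ofList (pvBpeel (cleaned.length + 1) names cleaned)

-- ===== PRECONDITION & SPEC =====
def Spec_strip_leading_name (reply_text : String) (first_name : String) (user_name : String) (out : String) : Prop := out = strip_leading_name_alt reply_text first_name user_name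
instance (reply_text : String) (first_name : String) (user_name : String) (out : String) : Decidable (Spec_strip_leading_name reply_text first_name user_name out) := by unfold Spec_strip_leading_name; infer_instance

-- ===== CLAIM (what is proved, stated in full; the proofs are below) =====
def Claim_equal_strip_leading_name : Prop := ∀ (reply_text : String) (first_name : String) (user_name : String), Dom_strip_leading_name reply_text first_name user_name → Spec_strip_leading_name reply_text first_name user_name (strip_leading_name reply_text first_name user_name)

-- ===== LEMMAS AND PROOFS =====

-- a snoc'd pattern is a prefix iff the base matches and the next character is the snoc'd one
lemma pv_prefix_snoc (n : List Char) (s : Char) (low : List Char) :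
    (n ++ [s] <+: low) ↔ (low.take n.length = n ∧ (low.drop n.length).take 1 = [s]) := by
  induction n generalizing low with
  | nil =>
    cases low with
    | nil => simp
    | cons d t => simp [List.cons_prefix_cons, eq_comm]
  | cons c n ih =>
    cases low with
    | nil => simp
    | cons d t =>
      simp [List.cons_prefix_cons, ih, eq_comm, and_assoc]

-- A's sep loop for one name, characterised by B's condition shape
lemma pv_trySeps_eq (cleaned name : List Char) :
    pvAtrySeps cleaned name [[','], ['!'], [' '], [':'], ['，']] =
      (if (PySem.Chars.lower cleaned).take name.length = PySem.Chars.lower name ∧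
          ((PySem.Chars.lower cleaned).drop name.length).take 1 ∈ pvSepsB then
        some (PySem.Chars.strip (cleaned.drop (name.length + 1)))
      else none) := by
  have key : ∀ s : Char, PySem.Chars.lowerChar s = s →
      ((PySem.Chars.startswith (PySem.Chars.lower cleaned) (PySem.Chars.lower (name ++ [s])) = true) ↔
        ((PySem.Chars.lower cleaned).take name.length = PySem.Chars.lower name ∧
         ((PySem.Chars.lower cleaned).drop name.length).take 1 = [s])) := by
    intro s hfix
    have hl : PySem.Chars.lower (name ++ [s]) = PySem.Chars.lower name ++ [s] := by
      simp [PySem.Chars.lower, hfix]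
    rw [hl, PySem.Chars.startswith_iff, pv_prefix_snoc]
    simp [PySem.Chars.lower]
  simp only [pvAtrySeps, key ',' (by decide), key '!' (by decide), key ' ' (by decide),
    key ':' (by decide), key '，' (by decide), PySem.List.slice_from_natCast,
    List.length_append, List.length_cons, List.length_nil,
    pvSepsB, List.mem_cons, List.not_mem_nil, or_false]
  split_ifs <;> first | rfl | tauto

-- one pass of A's while-body equals one step of B's peel on the lowered names
lemma pv_names_eq (cleaned : List Char) (names : List (List Char)) :
    pvAtryNames cleaned names = pvBstep cleaned (PySem.Chars.lower cleaned) (names.map PySem.Chars.lower) := by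
  induction names with
  | nil => rfl
  | cons name rest ih =>
    simp only [pvAtryNames, List.map_cons, pvBstep, pv_trySeps_eq, ih, PySem.List.slice_to_natCast,
      PySem.List.slice_natCast, PySem.List.slice_from_natCast, Nat.add_sub_cancel_left]
    have hlen : (PySem.Chars.lower name).length = name.length := by simp [PySem.Chars.lower]
    rw [hlen]
    by_cases h : (PySem.Chars.lower cleaned).take name.length = PySem.Chars.lower name ∧
        ((PySem.Chars.lower cleaned).drop name.length).take 1 ∈ pvSepsB
    · simp [h]
    · simp [h]

-- the two fuelled loops agree step for step
lemma pv_loop_eq (fuel : Nat) (names : List (List Char)) (cleaned : List Char) :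
    pvAloop fuel names cleaned = pvBpeel fuel (names.map PySem.Chars.lower) cleaned := by
  induction fuel generalizing cleaned with
  | zero => rfl
  | succ f ih =>
    simp only [pvAloop, pvBpeel, ← pv_names_eq]
    cases h : pvAtryNames cleaned names with
    | some c => simp [ih]
    | none => rfl

-- ===== VERDICT (by name: the statement is the Claim_ definition above) =====
theorem strip_leading_name_spec : Claim_equal_strip_leading_name := by
  intro reply_text first_name user_name _
  unfold Spec_strip_leading_name strip_leading_name strip_leading_name_alt
  simp only []
  rw [pv_loop_eq]
  congr 2
  split_ifs <;> simp
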